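-- pv_equiv track=rewrite | github.com/tkimweston/CCI | cpmi_16.py | removeNthElementFromQueue
-- ===== SOURCE A (Python) =====
-- def removeNthElementFromQueue(q, n):
--     temp = []
--     i = 1
--     while q:
--         if i != n:
--             temp.append(q.pop(0))
--         else:
--             q.pop(0)
--         i += 1
--
--     return temp
--
-- q = [1, 2, 3, 4, 5, 6, 7, 8, 9, 10]
-- ===== SOURCE B (Python) =====
-- def removeNthElementFromQueue(q, n):
--     # survivors by slicing; guard n < 1 because q[:n-1] with n=0 would drop the last element
--     result = q[:] if n < 1 else q[:n-1] + q[n:]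
--     q.clear()  # A consumes the queue; reproduce that observable mutation
--     return result
-- ===== Notes on version B (the rewrite author's own statement) =====
-- stated objective: faster
-- what changed: Replaces the element-by-element pop/append loop with two slices (q[:n-1] + q[n:], keeping everything when n < 1) plus a single clear() of the queue.
import Mathlib
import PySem

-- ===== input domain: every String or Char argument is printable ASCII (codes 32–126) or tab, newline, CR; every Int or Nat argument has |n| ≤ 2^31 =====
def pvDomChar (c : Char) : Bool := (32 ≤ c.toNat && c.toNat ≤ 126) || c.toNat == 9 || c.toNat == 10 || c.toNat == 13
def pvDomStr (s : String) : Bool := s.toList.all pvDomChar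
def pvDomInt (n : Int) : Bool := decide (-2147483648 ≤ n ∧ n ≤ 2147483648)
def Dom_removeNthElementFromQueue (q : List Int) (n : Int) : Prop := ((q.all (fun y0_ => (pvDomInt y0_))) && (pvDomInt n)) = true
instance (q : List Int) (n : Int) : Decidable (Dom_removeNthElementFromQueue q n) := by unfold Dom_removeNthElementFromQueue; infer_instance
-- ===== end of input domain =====

-- B replaces A's pop/append loop by two slices plus a clear of the queue; equivalence here is about the
-- RETURN value only (both Pythons leave q empty).
-- ===== PORT A =====
def pvGoA (n : Int) (q : List Int) (i : Int) (temp : List Int) : List Int :=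
  match q with
  | [] => temp
  | x :: xs => if i ≠ n then pvGoA n xs (i + 1) (temp ++ [x]) else pvGoA n xs (i + 1) temp

def removeNthElementFromQueue (q : List Int) (n : Int) : List Int :=
  pvGoA n q 1 []

-- ===== PORT B =====
def removeNthElementFromQueue_alt (q : List Int) (n : Int) : List Int :=
  if n < 1 then q
  else PySem.List.slice q none (some (n - 1)) ++ PySem.List.slice q (some n) none

-- ===== PRECONDITION & SPEC =====
def Spec_removeNthElementFromQueue (q : List Int) (n : Int) (out : List Int) : Prop := out = removeNthElementFromQueue_alt q n
instance (q : List Int) (n : Int) (out : List Int) : Decidable (Spec_removeNthElementFromQueue q n out) := by unfold Spec_removeNthElementFromQueue; infer_instance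

-- ===== CLAIM (what is proved, stated in full; the proofs are below) =====
def Claim_equal_removeNthElementFromQueue : Prop := ∀ (q : List Int) (n : Int), Dom_removeNthElementFromQueue q n → Spec_removeNthElementFromQueue q n (removeNthElementFromQueue q n)

-- ===== LEMMAS AND PROOFS =====

theorem pvGoA_eq (n : Int) : ∀ (q : List Int) (i : Int) (temp : List Int),
    pvGoA n q i temp =
      temp ++ (if n < i then q else q.take (n - i).toNat ++ q.drop (n - i + 1).toNat) := by
  intro q
  induction q with
  | nil => intro i temp; simp [pvGoA]
  | cons x xs ih =>
    intro i temp
    by_cases h : i = n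
    · subst h
      simp [pvGoA, ih]
    · by_cases hlt : n < i
      · have hlt' : n < i + 1 := by omega
        simp [pvGoA, h, ih, hlt, hlt']
      · -- i < n
        have hgt : ¬ n < i + 1 := by omega
        have ht : (n - i).toNat = (n - (i + 1)).toNat + 1 := by omega
        have hd : (n - i + 1).toNat = (n - (i + 1) + 1).toNat + 1 := by omega
        simp [pvGoA, h, ih, hlt, hgt, ht, hd]

-- ===== VERDICT (by name: the statement is the Claim_ definition above) =====
theorem removeNthElementFromQueue_spec : Claim_equal_removeNthElementFromQueue := by
  intro q n _
  unfold Spec_removeNthElementFromQueue removeNthElementFromQueue removeNthElementFromQueue_alt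
  rw [pvGoA_eq]
  by_cases h : n < 1
  · simp [h]
  · have h1 : (0 : Int) ≤ n - 1 := by omega
    have h0 : (0 : Int) ≤ n := by omega
    rw [PySem.List.slice_to q h1, PySem.List.slice_from q h0]
    simp [h]
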